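-- pv_equiv track=rewrite | github.com/liammcglothlin/COP4533ProgAssignment2 | cache_sim.py | precompute_next_use
-- ===== SOURCE A (Python) =====
-- INF = 10**18
--
-- def precompute_next_use(req):
--     next_use = [INF] * len(req)
--     next_pos = {}
--
--     for i in range(len(req) - 1, -1, -1):
--         x = req[i]
--         next_use[i] = next_pos.get(x, INF)
--         next_pos[x] = i
--
--     return next_use
-- ===== SOURCE B (Python) =====
-- INF = 10**18
--
-- def precompute_next_use(req):
--     next_use = [INF] * len(req)
--     positions = {}
--     for i, x in enumerate(req):
--         positions.setdefault(x, []).append(i)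
--     for lst in positions.values():
--         for j in range(len(lst) - 1):
--             next_use[lst[j]] = lst[j + 1]
--     return next_use
-- ===== Notes on version B (the rewrite author's own statement) =====
-- stated objective: alternative
-- what changed: Replaces the single reverse sweep that threads a last-seen-position dict with a forward group-by-value pass building each value's occurrence-index list, then filling next_use from consecutive pairs within each group (last occurrence keeps INF).
import Mathlib
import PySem

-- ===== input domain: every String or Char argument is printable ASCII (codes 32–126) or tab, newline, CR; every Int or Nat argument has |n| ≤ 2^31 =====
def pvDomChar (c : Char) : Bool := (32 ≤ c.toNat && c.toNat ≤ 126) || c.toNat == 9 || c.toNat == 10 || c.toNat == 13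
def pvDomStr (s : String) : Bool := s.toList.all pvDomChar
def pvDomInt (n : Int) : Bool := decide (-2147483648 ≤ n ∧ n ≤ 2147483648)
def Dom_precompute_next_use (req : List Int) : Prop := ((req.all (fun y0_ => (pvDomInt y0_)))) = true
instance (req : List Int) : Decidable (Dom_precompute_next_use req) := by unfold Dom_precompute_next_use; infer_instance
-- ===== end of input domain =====

-- B replaces A's reverse sweep with a last-seen dict by a forward group-by-value pass plus per-group consecutive-pair fills (alternative decomposition, same O(n) cost).


def INF : Int := 10 ^ 18

-- ===== PORT A =====
def precompute_next_use (req : List Int) : List Int :=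
  ((PySem.List.pyRange ((req.length : Int) - 1) (-1) (-1)).foldl
      (fun (st : List Int × PySem.Dict Int Int) i =>
        let x := PySem.List.pyGetD req i 0
        (PySem.List.pySetD st.1 i (st.2.getD x INF), st.2.insert x i))
      (List.replicate req.length INF, PySem.Dict.empty)).1

-- ===== PORT B =====
def precompute_next_use_alt (req : List Int) : List Int :=
  let positions : PySem.Dict Int (List Int) :=
    (PySem.List.enumerate req 0).foldl
      (fun d p => d.modify p.2 [] (fun l => l ++ [p.1])) PySem.Dict.empty
  positions.values.foldl
    (fun nu lst =>
      (PySem.List.pyRange 0 ((lst.length : Int) - 1) 1).foldl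
        (fun nu j =>
          PySem.List.pySetD nu (PySem.List.pyGetD lst j 0) (PySem.List.pyGetD lst (j + 1) 0))
        nu)
    (List.replicate req.length INF)

-- ===== PRECONDITION & SPEC =====
def Spec_precompute_next_use (req : List Int) (out : List Int) : Prop := out = precompute_next_use_alt req
instance (req : List Int) (out : List Int) : Decidable (Spec_precompute_next_use req out) := by unfold Spec_precompute_next_use; infer_instance

-- ===== CLAIM (what is proved, stated in full; the proofs are below) =====
def Claim_equal_precompute_next_use : Prop := ∀ (req : List Int), Dom_precompute_next_use req → Spec_precompute_next_use req (precompute_next_use req)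

-- ===== LEMMAS AND PROOFS =====

def pvFind (req : List Int) (a b x : Int) : Option Int :=
  (PySem.List.pyRange a b 1).find? (fun j => PySem.List.pyGetD req j 0 == x)

def pvStepA (req : List Int) (st : List Int × PySem.Dict Int Int) (i : Int) :
    List Int × PySem.Dict Int Int :=
  let x := PySem.List.pyGetD req i 0
  (PySem.List.pySetD st.1 i (st.2.getD x INF), st.2.insert x i)

lemma pvFind_succ (req : List Int) (a : Int) (m : Nat) (x : Int) (ha : a ≤ (m : Int)) :
    pvFind req a ((m : Int) + 1) x =
      ((pvFind req a (m : Int) x).or (if PySem.List.pyGetD req (m : Int) 0 == x then some (m : Int) else none)) := by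
  unfold pvFind
  rw [PySem.List.pyRange_one_succ_right ha, List.find?_append]
  congr 1
  cases h : (PySem.List.pyGetD req (m : Int) 0 == x) <;>
    simp only [PySem.List.pyGetD_natCast, List.getD_eq_getElem?_getD] at h <;>
    simp [List.find?, h]

lemma pvA_loop (req : List Int) : ∀ (m : Nat), m ≤ req.length → ∀ (nu : List Int) (d : PySem.Dict Int Int),
    nu.length = req.length →
    ((((PySem.List.pyRange ((m : Int) - 1) (-1) (-1)).foldl (pvStepA req) (nu, d)).1.length = req.length) ∧
     (∀ k : Nat, m ≤ k → ((PySem.List.pyRange ((m : Int) - 1) (-1) (-1)).foldl (pvStepA req) (nu, d)).1[k]? = nu[k]?) ∧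
     (∀ k : Nat, k < m → ((PySem.List.pyRange ((m : Int) - 1) (-1) (-1)).foldl (pvStepA req) (nu, d)).1[k]? =
        some ((pvFind req ((k : Int)+1) (m : Int) (PySem.List.pyGetD req (k : Int) 0)).getD (d.getD (PySem.List.pyGetD req (k : Int) 0) INF))) ∧
     (∀ x : Int, ((PySem.List.pyRange ((m : Int) - 1) (-1) (-1)).foldl (pvStepA req) (nu, d)).2.getD x INF =
        (pvFind req 0 (m : Int) x).getD (d.getD x INF))) := by
  intro m
  induction m with
  | zero =>
    intro _ nu d hlen
    rw [PySem.List.pyRange_neg_one_eq_nil (by norm_num)]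
    refine ⟨hlen, fun k _ => rfl, fun k hk => absurd hk (Nat.not_lt_zero k), fun x => ?_⟩
    simp [pvFind, PySem.List.pyRange_one_eq_nil (by norm_num : (0:Int) ≤ 0)]
  | succ m ih =>
    intro hm nu d hlen
    have hmlt : m < req.length := by omega
    have hcast : ((m + 1 : Nat) : Int) - 1 = (m : Int) := by push_cast; ring
    have hcast2 : ((m + 1 : Nat) : Int) = (m : Int) + 1 := by push_cast; ring
    rw [hcast, hcast2, PySem.List.pyRange_neg_one_cons (by omega), List.foldl_cons]
    have hstep : pvStepA req (nu, d) (m : Int) =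
        (nu.set m (d.getD (PySem.List.pyGetD req (m : Int) 0) INF),
         d.insert (PySem.List.pyGetD req (m : Int) 0) (m : Int)) := by
      simp [pvStepA]
    rw [hstep]
    set x_m := PySem.List.pyGetD req (m : Int) 0 with hxm
    set nu1 := nu.set m (d.getD x_m INF) with hnu1
    set d1 := d.insert x_m (m : Int) with hd1
    obtain ⟨h1, h2, h3, h4⟩ := ih (by omega) nu1 d1 (by simp [hnu1, hlen])
    refine ⟨h1, ?_, ?_, ?_⟩
    · intro k hk
      rw [h2 k (by omega), hnu1, List.getElem?_set_ne (by omega)]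
    · intro k hk
      rcases Nat.lt_succ_iff_lt_or_eq.mp hk with hk' | rfl
      · rw [h3 k hk', pvFind_succ req _ m _ (by omega)]
        rcases hfe : pvFind req ((k : Int)+1) (m : Int) (PySem.List.pyGetD req (k : Int) 0) with _ | j
        · by_cases hx : req[k]?.getD 0 = req[m]?.getD 0
          · simp [hd1, hxm, hx]
          · simp [hd1, PySem.Dict.getD_insert, hxm, hx, Ne.symm hx]
        · rfl
      · rw [h2 k (by omega), hnu1, List.getElem?_set_self (by omega)]
        have : pvFind req ((k : Int)+1) ((k : Int)+1) (PySem.List.pyGetD req (k : Int) 0) = none := by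
          simp [pvFind, PySem.List.pyRange_one_eq_nil (by omega : ((k:Int)+1) ≤ (k:Int)+1)]
        rw [this]; rfl
    · intro x
      rw [h4 x, pvFind_succ req 0 m x (by omega)]
      rcases hfe : pvFind req 0 (m : Int) x with _ | j
      · by_cases hx : x = req[m]?.getD 0
        · simp [hd1, hxm, hx]
        · simp [hd1, PySem.Dict.getD_insert, hxm, hx, Ne.symm hx]
      · rfl

def pvZC (g : List Int) : List (Int × Int) := g.zip g.tail

def pvSets (zs : List (Int × Int)) (nu : List Int) : List Int :=
  zs.foldl (fun nu p => PySem.List.pySetD nu p.1 p.2) nu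

def pvInner (g : List Int) (nu : List Int) : List Int :=
  (PySem.List.pyRange 0 ((g.length : Int) - 1) 1).foldl
    (fun nu j =>
      PySem.List.pySetD nu (PySem.List.pyGetD g j 0) (PySem.List.pyGetD g (j + 1) 0)) nu

lemma pvZC_cons (c : Int) (t : List Int) (h : t ≠ []) :
    pvZC (c :: t) = (c, t.head h) :: pvZC t := by
  cases t with
  | nil => exact absurd rfl h
  | cons b t' => simp [pvZC]

lemma pvSets_length (zs : List (Int × Int)) : ∀ nu, (pvSets zs nu).length = nu.length := by
  induction zs with
  | nil => intro nu; rfl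
  | cons p zs ih =>
    intro nu
    simp only [pvSets, List.foldl_cons]
    rw [show (zs.foldl (fun nu p => PySem.List.pySetD nu p.1 p.2) (PySem.List.pySetD nu p.1 p.2)) = pvSets zs (PySem.List.pySetD nu p.1 p.2) from rfl,
        ih, PySem.List.length_pySetD]

lemma pvSets_unchanged (k : Nat) (zs : List (Int × Int))
    (h : ∀ p ∈ zs, 0 ≤ p.1 ∧ p.1 ≠ (k : Int)) : ∀ nu, (pvSets zs nu)[k]? = nu[k]? := by
  induction zs with
  | nil => intro nu; rfl
  | cons p zs ih =>
    intro nu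
    obtain ⟨h0, hne⟩ := h p (List.mem_cons_self)
    have hrec := ih (fun q hq => h q (List.mem_cons_of_mem _ hq)) (PySem.List.pySetD nu p.1 p.2)
    simp only [pvSets, List.foldl_cons] at hrec ⊢
    rw [hrec, PySem.List.pySetD_of_nonneg nu p.2 h0, List.getElem?_set_ne (by omega)]

lemma pvInner_eq_sets (g : List Int) (nu : List Int) : pvInner g nu = pvSets (pvZC g) nu := by
  cases g with
  | nil =>
    unfold pvInner
    rw [PySem.List.pyRange_one_eq_nil (by norm_num)]
    rfl
  | cons a t =>
    unfold pvInner
    have hzlen : (pvZC (a :: t)).length = t.length := by simp [pvZC]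
    have hlen : (((a :: t).length : Int)) - 1 = ((pvZC (a :: t)).length : Int) := by
      simp [hzlen]
    rw [hlen]
    rw [PySem.List.foldl_congr_mem (PySem.List.pyRange 0 ((pvZC (a :: t)).length : Int)) _
        (fun acc j => PySem.List.pySetD acc (PySem.List.pyGetD (pvZC (a :: t)) j (0, 0)).1
          (PySem.List.pyGetD (pvZC (a :: t)) j (0, 0)).2) nu ?hcong]
    · exact PySem.List.foldl_pyRange_zero_pyGetD' (pvZC (a :: t)) (0, 0)
        (fun nu p => PySem.List.pySetD nu p.1 p.2) nu
    case hcong =>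
      intro acc j hj
      rw [PySem.List.mem_pyRange_one] at hj
      obtain ⟨h0, h1⟩ := hj
      have hjz : j.toNat < (pvZC (a :: t)).length := by omega
      have e1 : PySem.List.pyGetD (pvZC (a :: t)) j ((0 : Int), (0 : Int)) = (pvZC (a :: t))[j.toNat] :=
        PySem.List.pyGetD_eq_getElem _ _ h0 (by omega)
      have e4 : (pvZC (a :: t))[j.toNat] = ((a :: t)[j.toNat]'(by simp [pvZC] at hjz ⊢; omega),
          (a :: t)[j.toNat + 1]'(by simp [pvZC] at hjz ⊢; omega)) := by
        simp only [pvZC, List.getElem_zip, List.getElem_tail]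
      have e2 : PySem.List.pyGetD (a :: t) j 0 = (a :: t)[j.toNat]'(by simp [pvZC] at hjz ⊢; omega) :=
        PySem.List.pyGetD_eq_getElem _ _ h0 (by simp [pvZC] at hjz ⊢; omega)
      have e3 : PySem.List.pyGetD (a :: t) (j + 1) 0 = (a :: t)[(j + 1).toNat]'(by simp [pvZC] at hjz ⊢; omega) :=
        PySem.List.pyGetD_eq_getElem _ _ (by omega) (by simp [pvZC] at hjz ⊢; omega)
      have e5 : (j + 1).toNat = j.toNat + 1 := by omega
      simp only [e2, e3, e1, e4, e5]

lemma pvSets_at (k : Nat) (B' : List Int) : ∀ (C : List Int) (nu : List Int),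
    (∀ e ∈ C, 0 ≤ e ∧ e ≠ (k : Int)) → (∀ e ∈ B', 0 ≤ e ∧ e ≠ (k : Int)) → k < nu.length →
    (pvSets (pvZC (C ++ (k : Int) :: B')) nu)[k]? =
      (match B' with | [] => nu[k]? | b :: _ => some b) := by
  intro C
  induction C with
  | nil =>
    intro nu _ hB hk
    cases B' with
    | nil => rfl
    | cons b B'' =>
      have hzc : pvZC ((k : Int) :: b :: B'') = ((k : Int), b) :: pvZC (b :: B'') := rfl
      simp only [List.nil_append, hzc]
      have hstep : pvSets ((((k : Int), b)) :: pvZC (b :: B'')) nu =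
          pvSets (pvZC (b :: B'')) (PySem.List.pySetD nu (k : Int) b) := rfl
      rw [hstep, pvSets_unchanged k _ ?hmem]
      · rw [PySem.List.pySetD_of_nonneg nu b (by omega), Int.toNat_natCast,
          List.getElem?_set_self (by omega)]
      case hmem =>
        intro p hp
        exact hB p.1 (List.of_mem_zip hp).1
  | cons c C' ih =>
    intro nu hC hB hk
    obtain ⟨hc0, hcne⟩ := hC c List.mem_cons_self
    have hne : (C' ++ (k : Int) :: B') ≠ [] := by simp
    rw [List.cons_append, pvZC_cons c _ hne]
    have hstep : pvSets ((c, (C' ++ (k : Int) :: B').head hne) :: pvZC (C' ++ (k : Int) :: B')) nu =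
        pvSets (pvZC (C' ++ (k : Int) :: B')) (PySem.List.pySetD nu c ((C' ++ (k : Int) :: B').head hne)) := rfl
    rw [hstep, ih _ (fun e he => hC e (List.mem_cons_of_mem _ he)) hB
        (by rw [PySem.List.length_pySetD]; exact hk)]
    cases B' with
    | nil =>
      rw [PySem.List.pySetD_of_nonneg nu _ hc0, List.getElem?_set_ne (by omega)]
    | cons b B'' => rfl

def pvOcc (req : List Int) (x : Int) : List Int :=
  (PySem.List.pyRange 0 (req.length : Int) 1).filter (fun j => PySem.List.pyGetD req j 0 == x)

lemma pvOcc_mem (req : List Int) (x : Int) {j : Int} (hj : j ∈ pvOcc req x) :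
    0 ≤ j ∧ j < (req.length : Int) ∧ PySem.List.pyGetD req j 0 = x := by
  unfold pvOcc at hj
  obtain ⟨hr, hp⟩ := List.mem_filter.mp hj
  rw [PySem.List.mem_pyRange_one] at hr
  exact ⟨hr.1, hr.2, by simpa using hp⟩

lemma pvInner_unchanged (g : List Int) (k : Nat)
    (h : ∀ e ∈ g, 0 ≤ e ∧ e ≠ (k : Int)) (nu : List Int) : (pvInner g nu)[k]? = nu[k]? := by
  rw [pvInner_eq_sets]
  exact pvSets_unchanged k (pvZC g) (fun p hp => h p.1 (List.of_mem_zip hp).1) nu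

lemma pvInner_length (g nu : List Int) : (pvInner g nu).length = nu.length := by
  rw [pvInner_eq_sets, pvSets_length]

lemma pvOuter_length (req : List Int) : ∀ (K : List Int) (nu : List Int),
    (K.foldl (fun nu x => pvInner (pvOcc req x) nu) nu).length = nu.length := by
  intro K
  induction K with
  | nil => intro nu; rfl
  | cons c K ih =>
    intro nu
    rw [List.foldl_cons, ih, pvInner_length]

lemma pvOuter_unchanged (req : List Int) (k : Nat) : ∀ (K : List Int) (nu : List Int),
    (∀ x' ∈ K, ∀ e ∈ pvOcc req x', 0 ≤ e ∧ e ≠ (k : Int)) →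
    (K.foldl (fun nu x => pvInner (pvOcc req x) nu) nu)[k]? = nu[k]? := by
  intro K
  induction K with
  | nil => intro nu _; rfl
  | cons c K ih =>
    intro nu h
    rw [List.foldl_cons, ih _ (fun x' hx' => h x' (List.mem_cons_of_mem _ hx')),
        pvInner_unchanged _ k (h c List.mem_cons_self) nu]

lemma pvOcc_split (req : List Int) (k : Nat) (hk : k < req.length) :
    pvOcc req (PySem.List.pyGetD req (k : Int) 0) =
      ((PySem.List.pyRange 0 (k : Int) 1).filter
          (fun j => PySem.List.pyGetD req j 0 == PySem.List.pyGetD req (k : Int) 0))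
        ++ (k : Int) ::
      ((PySem.List.pyRange ((k : Int) + 1) (req.length : Int) 1).filter
          (fun j => PySem.List.pyGetD req j 0 == PySem.List.pyGetD req (k : Int) 0)) := by
  unfold pvOcc
  rw [PySem.List.pyRange_one_append 0 ((k : Int) + 1) (req.length : Int) (by omega) (by omega),
      PySem.List.pyRange_one_succ_right (by omega : (0 : Int) ≤ (k : Int)),
      List.filter_append, List.filter_append]
  simp

lemma pvGetD_cons_pos (a : Int) (l : List Int) (i : Int) (d : Int) (h : 1 ≤ i) :
    PySem.List.pyGetD (a :: l) i d = PySem.List.pyGetD l (i - 1) d := by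
  obtain ⟨n, rfl⟩ : ∃ n : Nat, i = ((n + 1 : Nat) : Int) := ⟨i.toNat - 1, by omega⟩
  rw [PySem.List.pyGetD_natCast, show ((n + 1 : Nat) : Int) - 1 = ((n : Nat) : Int) by push_cast; ring,
      PySem.List.pyGetD_natCast, List.getD_cons_succ]

lemma pvEnum_filter (x : Int) : ∀ (l : List Int) (s : Int),
    List.map (fun q => q.2)
      (List.filter (fun q => q.1 == x)
        (List.map (fun p => (p.2, p.1)) (PySem.List.enumerate l s)))
    = (PySem.List.pyRange s (s + (l.length : Int)) 1).filter
        (fun j => PySem.List.pyGetD l (j - s) 0 == x) := by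
  intro l
  induction l with
  | nil =>
    intro s
    rw [PySem.List.enumerate_nil, PySem.List.pyRange_one_eq_nil (by simp)]
    rfl
  | cons r t ih =>
    intro s
    rw [PySem.List.enumerate_cons]
    have hr : PySem.List.pyRange s (s + ((r :: t).length : Int)) 1 =
        s :: PySem.List.pyRange (s + 1) (s + ((r :: t).length : Int)) 1 :=
      PySem.List.pyRange_one_cons (by simp only [List.length_cons]; push_cast; omega)
    rw [hr]
    have hbound : s + ((r :: t).length : Int) = (s + 1) + (t.length : Int) := by
      simp only [List.length_cons]; push_cast; omega
    have htail : (PySem.List.pyRange (s + 1) (s + ((r :: t).length : Int)) 1).filter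
          (fun j => PySem.List.pyGetD (r :: t) (j - s) 0 == x)
        = (PySem.List.pyRange (s + 1) ((s + 1) + (t.length : Int)) 1).filter
          (fun j => PySem.List.pyGetD t (j - (s + 1)) 0 == x) := by
      rw [hbound]
      refine List.filter_congr ?_
      intro j hj
      rw [PySem.List.mem_pyRange_one] at hj
      rw [pvGetD_cons_pos r t (j - s) 0 (by omega),
          show j - s - 1 = j - (s + 1) by ring]
    rw [List.filter_cons, htail, ← ih (s + 1)]
    by_cases hx : r = x
    · simp [hx]
    · simp [hx, sub_self]

def pvPositions (req : List Int) : PySem.Dict Int (List Int) :=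
  (PySem.List.enumerate req 0).foldl
    (fun d p => d.modify p.2 [] (fun l => l ++ [p.1])) PySem.Dict.empty

lemma pvPositions_keys (req : List Int) : (pvPositions req).keys = PySem.Set.ofList req := by
  unfold pvPositions
  rw [PySem.Dict.keys_foldl_modify_key (PySem.List.enumerate req 0) (fun p => p.2) []
      (fun d p => fun l => l ++ [p.1]) PySem.Dict.empty,
      PySem.List.map_snd_enumerate]
  simp [PySem.Set.update_nil_left]

lemma pvPositions_getD (req : List Int) (x : Int) :
    (pvPositions req).getD x [] = pvOcc req x := by
  unfold pvPositions
  rw [show ((PySem.List.enumerate req 0).foldl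
        (fun d p => d.modify p.2 [] (fun l => l ++ [p.1])) PySem.Dict.empty)
      = (((PySem.List.enumerate req 0).map (fun p => (p.2, p.1))).foldl
        (fun d q => d.modify q.1 [] (fun l => l ++ [q.2])) PySem.Dict.empty) from
      (List.foldl_map (f := fun p : Int × Int => (p.2, p.1))
        (g := fun (d : PySem.Dict Int (List Int)) q => d.modify q.1 [] (fun l => l ++ [q.2]))
        (l := PySem.List.enumerate req 0) (init := PySem.Dict.empty)).symm]
  rw [PySem.Dict.getD_foldl_modify_append]
  have := pvEnum_filter x req 0
  simp only [zero_add] at this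
  rw [this]
  unfold pvOcc
  refine List.filter_congr ?_
  intro j _
  rw [show j - 0 = j by ring]

lemma pvB_outer (req : List Int) : precompute_next_use_alt req =
    (PySem.Set.ofList req).foldl (fun nu x => pvInner (pvOcc req x) nu)
      (List.replicate req.length INF) := by
  show (pvPositions req).values.foldl (fun nu g => pvInner g nu)
      (List.replicate req.length INF) = _
  rw [PySem.Dict.values_eq_map_keys _ (by rw [pvPositions_keys]; exact PySem.Set.nodup_ofList req)
      ([] : List Int)]
  rw [List.foldl_map, pvPositions_keys]
  simp only [pvPositions_getD]

lemma pvB_length (req : List Int) : (precompute_next_use_alt req).length = req.length := by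
  rw [pvB_outer, pvOuter_length, List.length_replicate]

lemma pvB_char (req : List Int) (k : Nat) (hk : k < req.length) :
    (precompute_next_use_alt req)[k]? =
      some ((pvFind req ((k : Int) + 1) (req.length : Int)
        (PySem.List.pyGetD req (k : Int) 0)).getD INF) := by
  set x := PySem.List.pyGetD req (k : Int) 0 with hxdef
  have hxmem : x ∈ PySem.Set.ofList req := by
    rw [PySem.Set.mem_ofList, hxdef, PySem.List.pyGetD_eq_getElem req 0 (by omega) (by omega)]
    exact List.getElem_mem _
  obtain ⟨K1, K2, hKs⟩ := List.append_of_mem hxmem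
  have hnd := PySem.Set.nodup_ofList (xs := req) (α := Int)
  rw [hKs] at hnd
  rw [List.nodup_append] at hnd
  obtain ⟨hnd1, hnd2, hdisj⟩ := hnd
  have hx1 : x ∉ K1 := fun h => absurd rfl (hdisj x h x List.mem_cons_self)
  have hx2 : x ∉ K2 := (List.nodup_cons.mp hnd2).1
  have hocc : ∀ x' : Int, x' ≠ x → ∀ e ∈ pvOcc req x', 0 ≤ e ∧ e ≠ (k : Int) := by
    intro x' hxne e he
    obtain ⟨h0, h1, h2⟩ := pvOcc_mem req x' he
    refine ⟨h0, fun heq => hxne ?_⟩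
    rw [heq] at h2
    rw [← h2, hxdef]
  rw [pvB_outer, hKs, List.foldl_append, List.foldl_cons]
  set nu1 := K1.foldl (fun nu x => pvInner (pvOcc req x) nu) (List.replicate req.length INF) with hnu1
  have hlen1 : nu1.length = req.length := by
    rw [hnu1, pvOuter_length, List.length_replicate]
  have hK2cond : ∀ x' ∈ K2, ∀ e ∈ pvOcc req x', 0 ≤ e ∧ e ≠ (k : Int) := by
    intro x' hx' e he
    exact hocc x' (fun h => hx2 (h ▸ hx')) e he
  rw [pvOuter_unchanged req k K2 _ hK2cond]
  set C := (PySem.List.pyRange 0 (k : Int) 1).filter (fun j => PySem.List.pyGetD req j 0 == x) with hCdef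
  set B' := (PySem.List.pyRange ((k : Int) + 1) (req.length : Int) 1).filter
      (fun j => PySem.List.pyGetD req j 0 == x) with hBdef
  have hsplit : pvOcc req x = C ++ (k : Int) :: B' := pvOcc_split req k hk
  have hC : ∀ e ∈ C, 0 ≤ e ∧ e ≠ (k : Int) := by
    intro e he
    rw [hCdef] at he
    obtain ⟨hr, _⟩ := List.mem_filter.mp he
    rw [PySem.List.mem_pyRange_one] at hr
    exact ⟨hr.1, by omega⟩
  have hB : ∀ e ∈ B', 0 ≤ e ∧ e ≠ (k : Int) := by
    intro e he
    rw [hBdef] at he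
    obtain ⟨hr, _⟩ := List.mem_filter.mp he
    rw [PySem.List.mem_pyRange_one] at hr
    exact ⟨by omega, by omega⟩
  have hK1cond : ∀ x' ∈ K1, ∀ e ∈ pvOcc req x', 0 ≤ e ∧ e ≠ (k : Int) := by
    intro x' hx' e he
    exact hocc x' (fun h => hx1 (h ▸ hx')) e he
  have hfind : pvFind req ((k : Int) + 1) (req.length : Int) x = B'.head? := by
    unfold pvFind
    rw [hBdef, List.head?_filter]
  rw [hsplit, pvInner_eq_sets, pvSets_at k B' C nu1 hC hB (by omega), hfind]
  clear_value B'
  cases B' with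
  | nil =>
    rw [hnu1, pvOuter_unchanged req k K1 _ hK1cond, List.getElem?_replicate]
    simp [hk]
  | cons b rest => rfl


lemma pvA_eq (req : List Int) : precompute_next_use req =
    ((PySem.List.pyRange ((req.length : Int) - 1) (-1) (-1)).foldl (pvStepA req)
      (List.replicate req.length INF, PySem.Dict.empty)).1 := rfl

lemma pvA_len (req : List Int) : (precompute_next_use req).length = req.length := by
  rw [pvA_eq]
  exact (pvA_loop req req.length le_rfl (List.replicate req.length INF) PySem.Dict.empty
    (by simp)).1

lemma pvA_char (req : List Int) (k : Nat) (hk : k < req.length) :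
    (precompute_next_use req)[k]? =
      some ((pvFind req ((k : Int) + 1) (req.length : Int)
        (PySem.List.pyGetD req (k : Int) 0)).getD INF) := by
  rw [pvA_eq,
      (pvA_loop req req.length le_rfl (List.replicate req.length INF) PySem.Dict.empty
        (by simp)).2.2.1 k hk]
  simp

-- ===== VERDICT (by name: the statement is the Claim_ definition above) =====
theorem precompute_next_use_spec : Claim_equal_precompute_next_use := by
  intro req _
  show precompute_next_use req = precompute_next_use_alt req
  apply List.ext_getElem?
  intro k
  by_cases hk : k < req.length
  · rw [pvA_char req k hk, pvB_char req k hk]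
  · rw [List.getElem?_eq_none (by rw [pvA_len]; omega),
        List.getElem?_eq_none (by rw [pvB_length]; omega)]
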